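-- pv_equiv track=rewrite | github.com/huggggoooooo/ProtoCycle | verl/tools/pfam/motif2constraints.py | choose_instance_row
-- ===== SOURCE A (Python) =====
-- from typing import Dict, List, Tuple, Optional
--
-- def choose_instance_row(inst_rows: List[Dict[str,str]],
--                         prefer_taxa: Optional[List[str]]=None) -> Optional[Dict[str,str]]:
--     """
--     在同一个 ELMIdentifier 下的多个实例中，挑一个代表：
--     - true positive优先
--     - prefer_taxa命中的物种优先
--     - 最后按 ProteinName 稳定排序
--     """
--     if not inst_rows:
--         return None
--
--     def key(r):
--         logic = (r.get("InstanceLogic","") or "").lower()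
--         tp = 0 if "true positive" in logic else 1
--
--         org = (r.get("Organism","") or "").lower()
--         tax_pen = 0 if (prefer_taxa and any(t in org for t in prefer_taxa)) else 1
--
--         return (tp, tax_pen, r.get("ProteinName",""))
--
--     return sorted(inst_rows, key=key)[0]
-- ===== SOURCE B (Python) =====
-- from typing import Dict, List, Optional
--
-- def choose_instance_row(inst_rows: List[Dict[str, str]],
--                         prefer_taxa: Optional[List[str]] = None) -> Optional[Dict[str, str]]:
--     # Tiered filtering instead of one composite-key sort:
--     # restrict to true positives if any, then to taxa hits if any, then min by ProteinName.
--     if not inst_rows: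
--         return None
--
--     def is_tp(r):
--         return "true positive" in (r.get("InstanceLogic", "") or "").lower()
--
--     def taxa_hit(r):
--         org = (r.get("Organism", "") or "").lower()
--         return bool(prefer_taxa) and any(t in org for t in prefer_taxa)
--
--     cands = inst_rows
--     tp = [r for r in cands if is_tp(r)]
--     if tp:
--         cands = tp
--     hits = [r for r in cands if taxa_hit(r)]
--     if hits:
--         cands = hits
--     return min(cands, key=lambda r: r.get("ProteinName", ""))
-- ===== Notes on version B (the rewrite author's own statement) =====
-- stated objective: alternative
-- what changed: Replaces the full composite-key sort with two order-preserving filter passes (true-positive tier, then taxa tier) followed by a single linear min by ProteinName.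
import Mathlib
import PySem

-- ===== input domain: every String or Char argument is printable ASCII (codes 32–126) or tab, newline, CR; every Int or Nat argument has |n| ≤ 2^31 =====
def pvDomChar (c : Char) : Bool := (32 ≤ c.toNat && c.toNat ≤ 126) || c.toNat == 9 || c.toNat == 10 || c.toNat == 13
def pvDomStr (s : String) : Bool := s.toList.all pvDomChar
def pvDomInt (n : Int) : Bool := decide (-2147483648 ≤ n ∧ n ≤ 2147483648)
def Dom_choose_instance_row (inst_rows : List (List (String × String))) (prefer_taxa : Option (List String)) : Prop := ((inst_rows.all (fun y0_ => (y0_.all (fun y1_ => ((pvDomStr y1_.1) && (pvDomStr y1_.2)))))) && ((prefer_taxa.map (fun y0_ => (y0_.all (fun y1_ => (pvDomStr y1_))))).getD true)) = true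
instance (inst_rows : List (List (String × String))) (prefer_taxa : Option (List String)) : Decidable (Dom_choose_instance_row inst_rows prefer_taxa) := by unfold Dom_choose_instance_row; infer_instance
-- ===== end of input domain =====

-- B changes the algorithm: tiered filtering + a single linear min instead of a composite-key sort.

-- shared row-field accessors (r.get(k, "") on the row dict; ("" or "") == "" for strings, so the `or ""` is a no-op)
def pvField (r : List (String × String)) (k : String) : String := PySem.Dict.getD (PySem.Dict.mk r) k ""
def pvIsTP (r : List (String × String)) : Bool :=
  PySem.Str.isIn "true positive" (PySem.Str.lower (pvField r "InstanceLogic"))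
def pvTaxaHit (prefer_taxa : Option (List String)) (r : List (String × String)) : Bool :=
  match prefer_taxa with
  | none => false
  | some ts => !ts.isEmpty && ts.any (fun t => PySem.Str.isIn t (PySem.Str.lower (pvField r "Organism")))
def pvName (r : List (String × String)) : String := pvField r "ProteinName"

-- ===== PORT A =====
-- key(r) = (tp, tax_pen, ProteinName), compared as Python compares tuples: lexicographically
def pvKeyA (prefer_taxa : Option (List String)) (r : List (String × String)) : Lex (Nat × Lex (Nat × String)) :=
  toLex ((if pvIsTP r then 0 else 1), toLex ((if pvTaxaHit prefer_taxa r then 0 else 1), pvName r))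

def choose_instance_row (inst_rows : List (List (String × String))) (prefer_taxa : Option (List String)) : Option (List (String × String)) :=
  if inst_rows.isEmpty then none
  else (PySem.List.sorted inst_rows (pvKeyA prefer_taxa) false).head?   -- sorted(inst_rows, key=key)[0]

-- ===== PORT B =====
def choose_instance_row_alt (inst_rows : List (List (String × String))) (prefer_taxa : Option (List String)) : Option (List (String × String)) :=
  if inst_rows.isEmpty then none
  else
    let tp := inst_rows.filter pvIsTP
    let c1 := if tp.isEmpty then inst_rows else tp
    let hits := c1.filter (pvTaxaHit prefer_taxa)
    let c2 := if hits.isEmpty then c1 else hits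
    PySem.List.min? c2 pvName

-- ===== PRECONDITION & SPEC =====
def Spec_choose_instance_row (inst_rows : List (List (String × String))) (prefer_taxa : Option (List String)) (out : Option (List (String × String))) : Prop := out = choose_instance_row_alt inst_rows prefer_taxa
instance (inst_rows : List (List (String × String))) (prefer_taxa : Option (List String)) (out : Option (List (String × String))) : Decidable (Spec_choose_instance_row inst_rows prefer_taxa out) := by unfold Spec_choose_instance_row; infer_instance

-- ===== CLAIM (what is proved, stated in full; the proofs are below) =====
def Claim_equal_choose_instance_row : Prop := ∀ (inst_rows : List (List (String × String))) (prefer_taxa : Option (List String)), Dom_choose_instance_row inst_rows prefer_taxa → Spec_choose_instance_row inst_rows prefer_taxa (choose_instance_row inst_rows prefer_taxa)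

-- ===== LEMMAS AND PROOFS =====

-- the running-minimum step for a boolean "strictly before" test (keeps the FIRST minimum)
def pvStep {α : Type} (lt : α → α → Bool) (acc : Option α) (x : α) : Option α :=
  match acc with
  | none => some x
  | some m => if lt x m then some x else some m

-- lexicographic combination: first the boolean rank (f = true ranks 0, before f = false rank 1), then lt'
def pvLtB {α : Type} (f : α → Bool) (lt' : α → α → Bool) (a b : α) : Bool :=
  (f a && !f b) || ((f a == f b) && lt' a b)

theorem pvInsertBy_head {α : Type} (before : α → α → Bool) (x : α) (ys : List α) :
    (PySem.List.insertBy before x ys).head? = pvStep (fun a b => before a b) ys.head? x := by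
  cases ys with
  | nil => simp [PySem.List.insertBy, pvStep]
  | cons y t =>
    by_cases h : before x y <;> simp [PySem.List.insertBy, pvStep, h]

theorem pvFoldl_insertBy_head {α : Type} (before : α → α → Bool) (xs : List α) (acc : List α) :
    (xs.foldl (fun a x => PySem.List.insertBy before x a) acc).head? =
      xs.foldl (pvStep (fun a b => before a b)) acc.head? := by
  induction xs generalizing acc with
  | nil => rfl
  | cons x t ih =>
    simp only [List.foldl_cons, ih, pvInsertBy_head]

theorem pvMin?_eq_foldl {α κ : Type} [LT κ] [DecidableLT κ] (xs : List α) (key : α → κ) :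
    PySem.List.min? xs key = xs.foldl (pvStep (fun a b => decide (key a < key b))) none := by
  unfold PySem.List.min?
  congr 1
  funext acc x
  cases acc with
  | none => rfl
  | some m => by_cases h : key x < key m <;> simp [pvStep, h]

-- the tier lemma: a running minimum under the lex-combined test equals a running minimum
-- under lt' over the f-filtered list when that is non-empty, over the whole list otherwise
theorem pvTier {α : Type} (f : α → Bool) (lt' : α → α → Bool) (xs : List α) (acc : Option α) :
    xs.foldl (pvStep (pvLtB f lt')) acc =
      (match acc with
       | none => if (xs.filter f).isEmpty then xs.foldl (pvStep lt') none
                 else (xs.filter f).foldl (pvStep lt') none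
       | some m => if f m then (xs.filter f).foldl (pvStep lt') (some m)
                 else if (xs.filter f).isEmpty then xs.foldl (pvStep lt') (some m)
                 else (xs.filter f).foldl (pvStep lt') none) := by
  induction xs generalizing acc with
  | nil =>
    cases acc with
    | none => rfl
    | some m => by_cases h : f m <;> simp [h]
  | cons x t ih =>
    cases acc with
    | none =>
      by_cases hx : f x
      · simp [pvStep, hx, ih (some x)]
      · simp only [List.foldl_cons, pvStep, ih (some x), hx]
        by_cases ht : (t.filter f).isEmpty <;>
          simp [hx, ht]
    | some m =>
      by_cases hm : f m
      · by_cases hx : f x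
        · have hlt : pvLtB f lt' x m = lt' x m := by simp [pvLtB, hx, hm]
          by_cases h : lt' x m <;>
            simp [pvStep, hlt, h, hx, ih, hm]
        · have hlt : pvLtB f lt' x m = false := by simp [pvLtB, hx, hm]
          simp [pvStep, hlt, hx, ih, hm]
      · by_cases hx : f x
        · have hlt : pvLtB f lt' x m = true := by simp [pvLtB, hx, hm]
          simp [pvStep, hlt, hx, ih, hm]
        · have hlt : pvLtB f lt' x m = lt' x m := by simp [pvLtB, hx, hm]
          by_cases h : lt' x m <;>
            by_cases ht : (t.filter f).isEmpty <;>
              simp [pvStep, hlt, h, hx, ih, hm, ht]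

-- A's lexicographic tuple comparison is the nested boolean lex combination
theorem pvKeyA_lt (prefer_taxa : Option (List String)) (a b : List (String × String)) :
    decide (pvKeyA prefer_taxa a < pvKeyA prefer_taxa b) =
      pvLtB pvIsTP (pvLtB (pvTaxaHit prefer_taxa) (fun a b => decide (pvName a < pvName b))) a b := by
  by_cases h1 : pvIsTP a <;> by_cases h2 : pvIsTP b <;>
    by_cases h3 : pvTaxaHit prefer_taxa a <;> by_cases h4 : pvTaxaHit prefer_taxa b <;>
      by_cases h5 : pvName a < pvName b <;>
        simp [pvKeyA, pvLtB, Prod.Lex.lt_iff, h1, h2, h3, h4, h5]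

-- ===== VERDICT (by name: the statement is the Claim_ definition above) =====
theorem choose_instance_row_spec : Claim_equal_choose_instance_row := by
  intro inst_rows prefer_taxa _
  unfold Spec_choose_instance_row choose_instance_row choose_instance_row_alt
  by_cases hne : inst_rows.isEmpty
  · simp [hne]
  · simp only [hne, Bool.false_eq_true, if_false]
    have hsorted :
        (PySem.List.sorted inst_rows (pvKeyA prefer_taxa) false).head? =
          inst_rows.foldl (pvStep (pvLtB pvIsTP
            (pvLtB (pvTaxaHit prefer_taxa) (fun a b => decide (pvName a < pvName b))))) none := by
      unfold PySem.List.sorted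
      simp only [if_neg (by decide : ¬(false = true))]
      rw [pvFoldl_insertBy_head]
      have heq : (pvStep (fun a b : List (String × String) =>
                decide (pvKeyA prefer_taxa a < pvKeyA prefer_taxa b))) =
             (pvStep (pvLtB pvIsTP (pvLtB (pvTaxaHit prefer_taxa)
                (fun a b => decide (pvName a < pvName b))))) := by
        funext acc x
        simp only [funext (fun a => funext (fun b => pvKeyA_lt prefer_taxa a b))]
      rw [heq]
      rfl
    rw [hsorted, pvTier]
    simp only
    by_cases htp : (inst_rows.filter pvIsTP).isEmpty
    · rw [if_pos htp, pvTier]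
      simp only
      by_cases hh : (inst_rows.filter (pvTaxaHit prefer_taxa)).isEmpty
      · rw [if_pos hh, pvMin?_eq_foldl, if_pos htp, if_pos hh]
      · rw [if_neg hh, pvMin?_eq_foldl, if_pos htp, if_neg hh]
    · rw [if_neg htp, pvTier]
      simp only
      by_cases hh : ((inst_rows.filter pvIsTP).filter (pvTaxaHit prefer_taxa)).isEmpty
      · rw [if_pos hh, pvMin?_eq_foldl, if_neg htp, if_pos hh]
      · rw [if_neg hh, pvMin?_eq_foldl, if_neg htp, if_neg hh]
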